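-- pv_equiv track=rewrite | github.com/microsoft/Brainsmith | brainsmith/core/dataflow/adfg/csdf.py | compute_cumulative_tokens
-- ===== SOURCE A (Python) =====
-- from typing import List, Tuple, Dict, Optional
--
-- def compute_cumulative_tokens(rates: List[int], n_firings: int) -> List[int]:
--     """Compute cumulative token production/consumption
--
--     Args:
--         rates: CSDF rate pattern
--         n_firings: Number of firings to compute
--
--     Returns:
--         List of cumulative tokens after each firing
--     """
--     if not rates:
--         return [0] * n_firings
--
--     cumulative = []
--     total = 0
--
--     for i in range(n_firings):
--         phase = i % len(rates)
--         total += rates[phase]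
--         cumulative.append(total)
--
--     return cumulative
-- ===== SOURCE B (Python) =====
-- from typing import List
--
--
-- def compute_cumulative_tokens(rates: List[int], n_firings: int) -> List[int]:
--     """Compute cumulative token production/consumption (prefix-sum / divmod closed form)."""
--     if not rates:
--         return [0] * n_firings
--     prefix = [0]
--     acc = 0
--     for r in rates:
--         acc += r
--         prefix.append(acc)
--     period = acc
--     L = len(rates)
--     return [((i + 1) // L) * period + prefix[(i + 1) % L] for i in range(n_firings)]
-- ===== Notes on version B (the rewrite author's own statement) =====
-- stated objective: alternative
-- what changed: B precomputes a one-period prefix-sum table and a period total, then emits each cumulative value by a divmod closed form instead of carrying a running total through the firing loop.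
import Mathlib
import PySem

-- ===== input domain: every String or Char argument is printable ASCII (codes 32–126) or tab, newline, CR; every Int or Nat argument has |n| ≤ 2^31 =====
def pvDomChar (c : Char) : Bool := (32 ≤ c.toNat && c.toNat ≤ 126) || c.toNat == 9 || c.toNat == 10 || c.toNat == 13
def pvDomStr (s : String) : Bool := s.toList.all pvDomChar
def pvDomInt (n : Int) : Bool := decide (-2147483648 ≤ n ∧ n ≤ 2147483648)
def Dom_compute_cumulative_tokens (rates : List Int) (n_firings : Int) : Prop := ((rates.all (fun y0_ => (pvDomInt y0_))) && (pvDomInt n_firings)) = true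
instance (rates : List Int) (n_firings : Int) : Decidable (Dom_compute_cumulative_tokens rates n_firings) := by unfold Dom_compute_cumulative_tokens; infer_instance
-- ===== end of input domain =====

-- B replaces A's running total with a one-period prefix-sum table plus a divmod closed form
-- per firing (objective: alternative decomposition; same asymptotic cost).

-- ===== PORT A =====
-- literal port of A: running total over range(n_firings); rates[i % len(rates)] is always
-- in range (0 ≤ phase < len rates), so pyGetD with default 0 is exact here
def compute_cumulative_tokens (rates : List Int) (n_firings : Int) : List Int :=
  if rates = [] then List.replicate n_firings.toNat 0
  else
    ((PySem.List.pyRange 0 n_firings 1).foldl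
      (fun (s : List Int × Int) i =>
        let phase := PySem.Int.mod i (rates.length : Int)
        let total := s.2 + PySem.List.pyGetD rates phase 0
        (s.1 ++ [total], total)) ([], 0)).1

-- ===== PORT B =====
-- literal port of Source B: build prefix table and period total, then closed form per firing;
-- the prefix index (i+1) % L is always in range (0 ≤ · ≤ L < length prefix), so pyGetD 0 is exact
def compute_cumulative_tokens_alt (rates : List Int) (n_firings : Int) : List Int :=
  if rates = [] then List.replicate n_firings.toNat 0
  else
    let pa := rates.foldl (fun (s : List Int × Int) r => (s.1 ++ [s.2 + r], s.2 + r)) ([0], 0)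
    let period := pa.2
    let L : Int := (rates.length : Int)
    (PySem.List.pyRange 0 n_firings 1).map (fun i =>
      PySem.Int.floordiv (i + 1) L * period + PySem.List.pyGetD pa.1 (PySem.Int.mod (i + 1) L) 0)

-- ===== PRECONDITION & SPEC =====
def Spec_compute_cumulative_tokens (rates : List Int) (n_firings : Int) (out : List Int) : Prop := out = compute_cumulative_tokens_alt rates n_firings
instance (rates : List Int) (n_firings : Int) (out : List Int) : Decidable (Spec_compute_cumulative_tokens rates n_firings out) := by unfold Spec_compute_cumulative_tokens; infer_instance

-- ===== CLAIM (what is proved, stated in full; the proofs are below) =====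
def Claim_equal_compute_cumulative_tokens : Prop := ∀ (rates : List Int) (n_firings : Int), Dom_compute_cumulative_tokens rates n_firings → Spec_compute_cumulative_tokens rates n_firings (compute_cumulative_tokens rates n_firings)

-- ===== LEMMAS AND PROOFS =====

-- reference cumulative sum: cf rates k = sum of the first k cyclic rates
def pvCf (rates : List Int) : Nat → Int
  | 0 => 0
  | k + 1 => pvCf rates k + rates.getD (k % rates.length) 0

-- A's loop computes (map (pvCf (·+1)) (range m), pvCf m)
theorem pvA_loop (rates : List Int) (m : Nat) :
    (List.range m).foldl
      (fun (s : List Int × Int) (k : Nat) =>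
        (s.1 ++ [s.2 + PySem.List.pyGetD rates (PySem.Int.mod (k : Int) (rates.length : Int)) 0],
          s.2 + PySem.List.pyGetD rates (PySem.Int.mod (k : Int) (rates.length : Int)) 0)) ([], 0)
    = ((List.range m).map (fun k => pvCf rates (k + 1)), pvCf rates m) := by
  induction m with
  | zero => simp [pvCf]
  | succ m ih =>
    rw [List.range_succ]
    simp only [List.foldl_append, List.foldl_cons, List.foldl_nil, List.map_append, ih]
    rw [PySem.Int.mod_natCast, PySem.List.pyGetD_natCast]
    simp [pvCf]

-- B's prefix-building loop, fully generalized
theorem pvPrefix_loop (rs : List Int) : ∀ (p : List Int) (a : Int),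
    rs.foldl (fun (s : List Int × Int) r => (s.1 ++ [s.2 + r], s.2 + r)) (p, a)
    = (p ++ (List.range rs.length).map (fun j => a + (rs.take (j + 1)).sum), a + rs.sum) := by
  induction rs with
  | nil => intro p a; simp
  | cons r rs ih =>
    intro p a
    simp only [List.foldl_cons, ih, List.length_cons, List.sum_cons]
    rw [List.range_succ_eq_map]
    simp [List.map_map, Function.comp, add_assoc]

-- the prefix table reads back partial sums
theorem pvPrefix_getD (rates : List Int) (j : Nat) (hj : j ≤ rates.length) :
    ([0] ++ (List.range rates.length).map (fun j => 0 + (rates.take (j + 1)).sum)).getD j 0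
      = (rates.take j).sum := by
  cases j with
  | zero => simp
  | succ k =>
    have hk : k < rates.length := by omega
    simp [List.getD, List.getElem?_map, List.getElem?_range hk]

-- closed form for the cyclic cumulative sum
theorem pvCf_closed (rates : List Int) (h : rates ≠ []) (k : Nat) :
    pvCf rates k = ((k / rates.length : Nat) : Int) * rates.sum
      + (rates.take (k % rates.length)).sum := by
  have hL : 0 < rates.length := List.length_pos_iff.mpr h
  induction k with
  | zero => simp [pvCf]
  | succ k ih =>
    have hkL : k % rates.length < rates.length := Nat.mod_lt _ hL
    rw [pvCf, ih]
    have hget : rates.getD (k % rates.length) 0 = rates[k % rates.length] :=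
      List.getD_eq_getElem _ _ hkL
    by_cases hc : k % rates.length + 1 < rates.length
    · have hd : (k + 1) / rates.length = k / rates.length ∧
          (k + 1) % rates.length = k % rates.length + 1 := by
        rw [Nat.div_mod_unique hL]
        constructor
        · have := Nat.div_add_mod k rates.length
          omega
        · exact hc
      rw [hd.1, hd.2, List.sum_take_succ _ _ hkL, hget]
      ring
    · have hc' : k % rates.length + 1 = rates.length := by omega
      have hd : (k + 1) / rates.length = k / rates.length + 1 ∧
          (k + 1) % rates.length = 0 := by
        rw [Nat.div_mod_unique hL]
        constructor
        · have h1 := Nat.div_add_mod k rates.length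
          have h2 : rates.length * (k / rates.length + 1)
              = rates.length * (k / rates.length) + rates.length := by ring
          omega
        · exact hL
      have hsum : (rates.take (k % rates.length)).sum + rates[k % rates.length] = rates.sum := by
        rw [← List.sum_take_succ _ _ hkL, hc', List.take_length]
      rw [hd.1, hd.2, hget, Nat.cast_add, Nat.cast_one]
      simp only [List.take_zero, List.sum_nil]
      linarith [hsum]
  
-- ===== VERDICT (by name: the statement is the Claim_ definition above) =====
theorem compute_cumulative_tokens_spec : Claim_equal_compute_cumulative_tokens := by
  intro rates n_firings _
  show compute_cumulative_tokens rates n_firings = compute_cumulative_tokens_alt rates n_firings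
  unfold compute_cumulative_tokens compute_cumulative_tokens_alt
  by_cases h : rates = []
  · simp [h]
  · simp only [h, if_false]
    have hL : 0 < rates.length := List.length_pos_iff.mpr h
    rw [pvPrefix_loop, PySem.List.pyRange_zero, List.foldl_map, pvA_loop, List.map_map]
    apply List.map_congr_left
    intro k hk
    simp only [Function.comp]
    have hcast : ((k : Nat) : Int) + 1 = ((k + 1 : Nat) : Int) := by push_cast; ring
    rw [hcast, PySem.Int.mod_natCast, PySem.Int.floordiv_natCast, PySem.List.pyGetD_natCast]
    have hmod : (k + 1) % rates.length ≤ rates.length := le_of_lt (Nat.mod_lt _ hL)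
    rw [pvPrefix_getD rates _ hmod, pvCf_closed rates h]
    ring
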